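-- pv_equiv track=rewrite | github.com/simyoungjun/CMU_coding_test | day18.py | solution
-- ===== SOURCE A (Python) =====
-- def solution(s):
--     answer = []
--     for i in s:
--         if not(answer):
--             answer.append(i)
--         else:
--             if(answer[-1] == i):
--                 answer.pop()
--             else:
--                 answer.append(i)
--     if not(answer):
--         return 1
--     else:
--         return 0
-- ===== SOURCE B (Python) =====
-- def solution(s):
--     t = s
--     changed = True
--     while changed:
--         changed = False
--         for i in range(len(t) - 1):
--             if t[i] == t[i + 1]:
--                 t = t[:i] + t[i + 2:]
--                 changed = True
--                 break
--     return 1 if t == "" else 0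
-- ===== Notes on version B (the rewrite author's own statement) =====
-- stated objective: alternative
-- what changed: Replaces the single-pass stack simulation with a fixed-point loop that repeatedly scans for the first adjacent equal pair and deletes it until none remains, then tests emptiness.
import Mathlib
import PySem

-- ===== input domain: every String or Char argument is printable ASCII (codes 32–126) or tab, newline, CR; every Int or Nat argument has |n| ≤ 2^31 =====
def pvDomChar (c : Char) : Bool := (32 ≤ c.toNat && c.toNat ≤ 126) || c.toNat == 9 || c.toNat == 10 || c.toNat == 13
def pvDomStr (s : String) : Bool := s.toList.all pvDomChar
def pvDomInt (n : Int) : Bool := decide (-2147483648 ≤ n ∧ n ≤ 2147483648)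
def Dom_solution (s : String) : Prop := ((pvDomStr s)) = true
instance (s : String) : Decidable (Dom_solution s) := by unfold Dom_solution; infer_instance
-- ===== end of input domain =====

-- B replaces A's single-pass stack with a fixed-point loop deleting the first adjacent
-- equal pair until none remains (alternative decomposition, not faster).

-- ===== PORT A =====
-- the body of A's for-loop: push i, or pop when the stack top equals i
def solutionStep (answer : List Char) (i : Char) : List Char :=
  if answer.isEmpty then answer ++ [i]
  else if PySem.List.pyGet? answer (-1) = some i then answer.dropLast
  else answer ++ [i]

def solution (s : String) : Int :=
  let answer := s.toList.foldl solutionStep []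
  if answer.isEmpty then 1 else 0

-- ===== PORT B =====
-- the inner for-loop of B: first index i with t[i] == t[i+1], if any
def findPair : List Char → Option Nat
  | c :: d :: rest => if c = d then some 0 else (findPair (d :: rest)).map (· + 1)
  | _ => none

theorem findPair_le : ∀ (l : List Char) (i : Nat), findPair l = some i → i + 2 ≤ l.length
  | [], _, h => by simp [findPair] at h
  | [_], _, h => by simp [findPair] at h
  | c :: d :: rest, i, h => by
      by_cases hcd : c = d
      · simp [findPair, hcd] at h; subst h; simp [List.length_cons]
      · simp [findPair, hcd] at h
        obtain ⟨j, hj, rfl⟩ := h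
        have := findPair_le (d :: rest) j hj
        simp at this ⊢; omega

-- the while-loop of B: delete t[:i] + t[i+2:] at the first adjacent pair until stable
def reduceLoop (t : List Char) : List Char :=
  match h : findPair t with
  | some i => reduceLoop (t.take i ++ t.drop (i + 2))
  | none => t
termination_by t.length
decreasing_by
  have := findPair_le t i h
  simp; omega

def solution_alt (s : String) : Int :=
  if reduceLoop s.toList = [] then 1 else 0

-- ===== PRECONDITION & SPEC =====
def Spec_solution (s : String) (out : Int) : Prop := out = solution_alt s
instance (s : String) (out : Int) : Decidable (Spec_solution s out) := by unfold Spec_solution; infer_instance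

-- ===== CLAIM (what is proved, stated in full; the proofs are below) =====
def Claim_equal_solution : Prop := ∀ (s : String), Dom_solution s → Spec_solution s (solution s)

-- ===== LEMMAS AND PROOFS =====

-- A's stack with access at the head instead of the last element
def rstep (r : List Char) (c : Char) : List Char :=
  match r with
  | [] => [c]
  | d :: t => if d = c then t else c :: d :: t

theorem step_eq_rstep (st : List Char) (c : Char) :
    solutionStep st c = (rstep st.reverse c).reverse := by
  cases hr : st.reverse with
  | nil =>
      have hst : st = [] := by simpa using congrArg List.reverse hr
      subst hst; simp [solutionStep, rstep]
  | cons d t =>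
      have hst : st = t.reverse ++ [d] := by
        have := congrArg List.reverse hr; simpa using this
      subst hst
      by_cases hdc : d = c
      · simp [solutionStep, rstep, hdc, PySem.List.pyGet?_neg_one]
      · simp [solutionStep, rstep, hdc, PySem.List.pyGet?_neg_one]

theorem foldl_step_eq_rstep : ∀ (l : List Char) (st : List Char),
    l.foldl solutionStep st = (l.foldl rstep st.reverse).reverse
  | [], st => by simp
  | c :: l, st => by
      simp only [List.foldl_cons]
      rw [foldl_step_eq_rstep l, step_eq_rstep, List.reverse_reverse]

theorem rstep_chain (r : List Char) (c : Char)
    (h : List.IsChain (fun a b : Char => a ≠ b) r) :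
    List.IsChain (fun a b : Char => a ≠ b) (rstep r c) := by
  cases r with
  | nil => simp [rstep, List.isChain_singleton]
  | cons d t =>
      by_cases hdc : d = c
      · simpa [rstep, hdc] using h.tail
      · cases t with
        | nil => simp [rstep, hdc, List.isChain_cons_cons, List.isChain_singleton, Ne.symm hdc]
        | cons e u =>
            simp only [rstep, if_neg hdc, List.isChain_cons_cons] at h ⊢
            exact ⟨Ne.symm hdc, h⟩

theorem rstep_rstep (r : List Char) (c : Char)
    (h : List.IsChain (fun a b : Char => a ≠ b) r) :
    rstep (rstep r c) c = r := by
  cases r with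
  | nil => simp [rstep]
  | cons d t =>
      by_cases hdc : d = c
      · subst hdc
        cases t with
        | nil => simp [rstep]
        | cons e u =>
            have hde : d ≠ e := (List.isChain_cons_cons.mp h).1
            simp [rstep]
            intro h'
            exact absurd h'.symm hde
      · simp [rstep, hdc]

theorem foldl_rstep_chain : ∀ (l r : List Char),
    List.IsChain (fun a b : Char => a ≠ b) r →
    List.IsChain (fun a b : Char => a ≠ b) (l.foldl rstep r)
  | [], _, h => h
  | c :: l, r, h => foldl_rstep_chain l (rstep r c) (rstep_chain r c h)

theorem foldl_cancel (xs ys : List Char) (c : Char) (r : List Char)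
    (h : List.IsChain (fun a b : Char => a ≠ b) r) :
    (xs ++ c :: c :: ys).foldl rstep r = (xs ++ ys).foldl rstep r := by
  simp only [List.foldl_append, List.foldl_cons]
  rw [rstep_rstep _ c (foldl_rstep_chain xs r h)]

theorem chain_of_findPair_none : ∀ (l : List Char), findPair l = none →
    List.IsChain (fun a b : Char => a ≠ b) l
  | [], _ => List.isChain_nil
  | [_], _ => List.isChain_singleton _
  | c :: d :: rest, h => by
      by_cases hcd : c = d
      · simp [findPair, hcd] at h
      · simp [findPair, hcd] at h
        exact List.isChain_cons_cons.mpr ⟨hcd, chain_of_findPair_none (d :: rest) h⟩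

theorem split_of_findPair_some : ∀ (l : List Char) (i : Nat), findPair l = some i →
    ∃ c, l.take i ++ c :: c :: l.drop (i + 2) = l
  | [], _, h => by simp [findPair] at h
  | [_], _, h => by simp [findPair] at h
  | c :: d :: rest, i, h => by
      by_cases hcd : c = d
      · simp [findPair, hcd] at h
        subst h hcd
        exact ⟨c, by simp⟩
      · simp [findPair, hcd] at h
        obtain ⟨j, hj, rfl⟩ := h
        obtain ⟨e, he⟩ := split_of_findPair_some (d :: rest) j hj
        refine ⟨e, ?_⟩
        simpa using congrArg (c :: ·) he

theorem reduceLoop_rstack : ∀ (l : List Char),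
    (reduceLoop l).foldl rstep [] = l.foldl rstep [] ∧ findPair (reduceLoop l) = none := by
  intro l
  induction l using reduceLoop.induct with
  | case1 t i h ih =>
      rw [reduceLoop, h]
      refine ⟨?_, ih.2⟩
      rw [ih.1]
      obtain ⟨c, hc⟩ := split_of_findPair_some t i h
      conv_rhs => rw [← hc]
      exact (foldl_cancel _ _ c [] List.isChain_nil).symm
  | case2 t h => rw [reduceLoop, h]; exact ⟨rfl, h⟩

theorem foldl_rstep_of_chain : ∀ (l r : List Char),
    List.IsChain (fun a b : Char => a ≠ b) (l.reverse ++ r) →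
    l.foldl rstep r = l.reverse ++ r
  | [], r, _ => by simp
  | c :: l, r, h => by
      have hcr : List.IsChain (fun a b : Char => a ≠ b) (c :: r) :=
        h.suffix (by simpa using (c :: r).suffix_append l.reverse)
      have hstep : rstep r c = c :: r := by
        cases r with
        | nil => simp [rstep]
        | cons e t =>
            have : c ≠ e := (List.isChain_cons_cons.mp hcr).1
            simp [rstep, Ne.symm this]
      simp only [List.foldl_cons, hstep]
      rw [foldl_rstep_of_chain l (c :: r) (by simpa using h)]
      simp

theorem rstack_empty_iff (l : List Char) :
    l.foldl rstep [] = [] ↔ reduceLoop l = [] := by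
  obtain ⟨h1, h2⟩ := reduceLoop_rstack l
  have := foldl_rstep_of_chain (reduceLoop l) []
    (by
      simp only [List.append_nil]
      exact List.isChain_reverse.mpr
        ((chain_of_findPair_none _ h2).imp_of_mem_imp fun _ _ _ _ hab => Ne.symm hab))
  rw [← h1, this]
  simp

-- ===== VERDICT (by name: the statement is the Claim_ definition above) =====
theorem solution_spec : Claim_equal_solution := by
  intro s _
  unfold Spec_solution solution solution_alt
  have hfold : s.toList.foldl solutionStep [] = (s.toList.foldl rstep []).reverse := by
    simpa using foldl_step_eq_rstep s.toList []
  have hiff : (s.toList.foldl solutionStep []).isEmpty = true ↔ reduceLoop s.toList = [] := by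
    rw [hfold, List.isEmpty_iff, List.reverse_eq_nil_iff, rstack_empty_iff]
  by_cases hr : reduceLoop s.toList = []
  · simp [hiff.mpr hr, hr]
  · have : ¬ (s.toList.foldl solutionStep []).isEmpty = true := fun h => hr (hiff.mp h)
    simp [this, hr]
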